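-- pv_equiv track=rewrite | github.com/kgthunder-arch/Thunder-repository | app.py | suggest_targets
-- ===== SOURCE A (Python) =====
-- def suggest_targets(columns: list[str]) -> dict[str, str]:
--     suggestions: dict[str, str] = {}
--     keywords = {
--         "yield": ["yield", "production"],
--         "price": ["price", "revenue"],
--         "demand": ["demand", "sales", "consumption"],
--     }
--     for forecast_type, aliases in keywords.items():
--         for column in columns:
--             name = column.lower()
--             if any(alias in name for alias in aliases):
--                 suggestions[forecast_type] = column
--                 break
--         suggestions.setdefault(forecast_type, "")
--     return suggestions
-- ===== SOURCE B (Python) =====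
-- def suggest_targets(columns: list[str]) -> dict[str, str]:
--     y = p = d = None
--     for column in columns:
--         name = column.lower()
--         if y is None and ("yield" in name or "production" in name):
--             y = column
--         if p is None and ("price" in name or "revenue" in name):
--             p = column
--         if d is None and ("demand" in name or "sales" in name or "consumption" in name):
--             d = column
--     return {
--         "yield": y if y is not None else "",
--         "price": p if p is not None else "",
--         "demand": d if d is not None else "",
--     }
-- ===== Notes on version B (the rewrite author's own statement) =====
-- stated objective: faster
-- what changed: Replaces the per-type scans over columns (three passes with break, dict mutation and setdefault) by a single pass over columns that lowercases each column once and fills three still-unset slots, assembling the result dict at the end.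
import Mathlib
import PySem

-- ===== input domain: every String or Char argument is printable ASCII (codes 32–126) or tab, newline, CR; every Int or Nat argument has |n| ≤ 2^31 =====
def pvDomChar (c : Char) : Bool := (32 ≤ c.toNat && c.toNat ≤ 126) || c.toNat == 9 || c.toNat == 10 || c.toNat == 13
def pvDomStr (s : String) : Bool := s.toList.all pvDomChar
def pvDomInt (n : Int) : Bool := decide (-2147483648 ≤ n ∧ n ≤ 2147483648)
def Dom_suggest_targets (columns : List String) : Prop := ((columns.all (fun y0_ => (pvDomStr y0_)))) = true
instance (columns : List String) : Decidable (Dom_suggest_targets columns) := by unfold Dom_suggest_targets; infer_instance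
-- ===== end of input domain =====

-- B replaces A's three per-type passes over columns by one pass that lowercases each
-- column once and fills three still-unset slots (objective: faster, measured).

-- ===== PORT A =====
-- `any(alias in name for alias in aliases)` with name = column.lower()
def stMatch (aliases : List String) (column : String) : Bool :=
  aliases.any (fun a => PySem.Str.isIn a (PySem.Str.lower column))

-- A's inner `for column in columns: … break` loop: first matching column, if any
def stFind (aliases : List String) : List String → Option String
  | [] => none
  | c :: rest => if stMatch aliases c then some c else stFind aliases rest

def stKeywords : List (String × List String) :=
  [("yield", ["yield", "production"]),
   ("price", ["price", "revenue"]),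
   ("demand", ["demand", "sales", "consumption"])]

def suggest_targets (columns : List String) : List (String × String) :=
  (stKeywords.foldl (fun (d : PySem.Dict String String) kv =>
      let d' := match stFind kv.2 columns with
        | some c => d.insert kv.1 c
        | none => d
      d'.setdefault kv.1 "") PySem.Dict.empty).items

-- ===== PORT B =====
-- one fold over columns; state = (yield slot, price slot, demand slot), None = unset
def stbStep (s : Option String × Option String × Option String) (column : String) :
    Option String × Option String × Option String :=
  let name := PySem.Str.lower column
  ((if s.1.isNone && (PySem.Str.isIn "yield" name || PySem.Str.isIn "production" name)
      then some column else s.1),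
   (if s.2.1.isNone && (PySem.Str.isIn "price" name || PySem.Str.isIn "revenue" name)
      then some column else s.2.1),
   (if s.2.2.isNone && (PySem.Str.isIn "demand" name || PySem.Str.isIn "sales" name ||
        PySem.Str.isIn "consumption" name)
      then some column else s.2.2))

def suggest_targets_alt (columns : List String) : List (String × String) :=
  let r := columns.foldl stbStep (none, none, none)
  [("yield", r.1.getD ""), ("price", r.2.1.getD ""), ("demand", r.2.2.getD "")]

-- ===== PRECONDITION & SPEC =====
def Spec_suggest_targets (columns : List String) (out : List (String × String)) : Prop := out = suggest_targets_alt columns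
instance (columns : List String) (out : List (String × String)) : Decidable (Spec_suggest_targets columns out) := by unfold Spec_suggest_targets; infer_instance

-- ===== CLAIM (what is proved, stated in full; the proofs are below) =====
def Claim_equal_suggest_targets : Prop := ∀ (columns : List String), Dom_suggest_targets columns → Spec_suggest_targets columns (suggest_targets columns)

-- ===== LEMMAS AND PROOFS =====

-- one slot of B's fold, as a standalone fold
def optStep (m : String → Bool) (acc : Option String) (c : String) : Option String :=
  if acc.isNone && m c then some c else acc

lemma stbStep_decompose (cols : List String) :
    ∀ (a b c : Option String),
      cols.foldl stbStep (a, b, c) =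
        (cols.foldl (optStep (stMatch ["yield", "production"])) a,
         cols.foldl (optStep (stMatch ["price", "revenue"])) b,
         cols.foldl (optStep (stMatch ["demand", "sales", "consumption"])) c) := by
  induction cols with
  | nil => intro a b c; rfl
  | cons x rest ih =>
      intro a b c
      simp only [List.foldl_cons]
      rw [ih]
      congr 1 <;> [skip; congr 1] <;>
        simp [stbStep, optStep, stMatch, Bool.or_assoc]

lemma optStep_keep (m : String → Bool) (cols : List String) (v : String) :
    cols.foldl (optStep m) (some v) = some v := by
  induction cols with
  | nil => rfl
  | cons x rest ih => simpa [optStep] using ih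

lemma optStep_none (al : List String) (cols : List String) :
    cols.foldl (optStep (stMatch al)) none = stFind al cols := by
  induction cols with
  | nil => rfl
  | cons x rest ih =>
      by_cases h : stMatch al x
      · simp [optStep, h, stFind, optStep_keep]
      · simp [optStep, h, stFind, ih]

lemma suggest_targets_eq_stFind (columns : List String) :
    suggest_targets columns =
      [("yield", (stFind ["yield", "production"] columns).getD ""),
       ("price", (stFind ["price", "revenue"] columns).getD ""),
       ("demand", (stFind ["demand", "sales", "consumption"] columns).getD "")] := by
  unfold suggest_targets stKeywords
  rcases h1 : stFind ["yield", "production"] columns with _ | c1 <;>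
    rcases h2 : stFind ["price", "revenue"] columns with _ | c2 <;>
      rcases h3 : stFind ["demand", "sales", "consumption"] columns with _ | c3 <;>
        simp [h1, h2, h3, PySem.Dict.insert, PySem.Dict.setdefault, PySem.Dict.empty,
          PySem.Dict.contains]

-- ===== VERDICT (by name: the statement is the Claim_ definition above) =====
theorem suggest_targets_spec : Claim_equal_suggest_targets := by
  intro columns _
  unfold Spec_suggest_targets suggest_targets_alt
  rw [suggest_targets_eq_stFind, stbStep_decompose, optStep_none, optStep_none, optStep_none]
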